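-- pv_equiv track=rewrite | github.com/LeiyuanMa/leetcode | string_related/divingBoard.py | divingBoard
-- ===== SOURCE A (Python) =====
-- def divingBoard( shorter: int, longer: int, k: int):
--     if not k:
--         return []
--     if shorter == longer:
--         return [shorter * k]
--     res = [0] * (k + 1)
--     for i in range(k + 1):
--         res[i] = shorter * (k - i) + longer * i
--     return res
-- ===== SOURCE B (Python) =====
-- def divingBoard(shorter: int, longer: int, k: int):
--     if not k:
--         return []
--     if shorter == longer:
--         return [shorter * k]
--     # build back-to-front with a running value, starting from the largest-index
--     # term longer*k and subtracting the step each time, then reverse once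
--     diff = longer - shorter
--     res = []
--     cur = longer * k
--     for _ in range(k + 1):
--         res.append(cur)
--         cur -= diff
--     res.reverse()
--     return res
-- ===== Notes on version B (the rewrite author's own statement) =====
-- stated objective: alternative
-- what changed: A preallocates a k+1 slot list and fills slot i with the closed-form shorter*(k-i)+longer*i; B instead keeps a single running value starting at longer*k, appends it and subtracts the step (longer-shorter) each iteration, building the list back-to-front, and reverses once at the end.
import Mathlib
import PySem

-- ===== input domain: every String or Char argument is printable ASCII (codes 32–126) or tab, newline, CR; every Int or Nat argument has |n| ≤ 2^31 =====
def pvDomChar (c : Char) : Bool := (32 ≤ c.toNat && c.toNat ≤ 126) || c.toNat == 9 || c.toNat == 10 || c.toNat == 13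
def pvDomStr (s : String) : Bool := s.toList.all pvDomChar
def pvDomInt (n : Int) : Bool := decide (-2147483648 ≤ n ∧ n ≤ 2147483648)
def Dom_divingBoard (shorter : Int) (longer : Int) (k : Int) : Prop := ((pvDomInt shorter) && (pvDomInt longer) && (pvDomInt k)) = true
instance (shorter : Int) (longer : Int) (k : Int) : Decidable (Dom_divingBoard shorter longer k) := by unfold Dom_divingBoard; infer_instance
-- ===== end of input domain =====

-- B replaces A's preallocated list filled by the closed-form index formula with a running-value accumulator built back-to-front and reversed once; same O(k) cost, alternative decomposition.


-- ===== PORT A =====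
-- res = [0]*(k+1); for i in range(k+1): res[i] = shorter*(k-i)+longer*i
def divingBoard (shorter : Int) (longer : Int) (k : Int) : List Int :=
  if k = 0 then []
  else if shorter = longer then [shorter * k]
  else
    let res : List Int := List.replicate (k + 1).toNat 0
    (PySem.List.pyRange 0 (k + 1) 1).foldl
      (fun r i => r.set i.toNat (shorter * (k - i) + longer * i)) res

-- ===== PORT B =====
-- running value cur starting at longer*k; append cur, cur -= diff, k+1 times; reverse
def divingBoard_alt (shorter : Int) (longer : Int) (k : Int) : List Int :=
  if k = 0 then []
  else if shorter = longer then [shorter * k]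
  else
    ((PySem.List.pyRange 0 (k + 1) 1).foldl
      (fun (st : List Int × Int) _ => (st.1 ++ [st.2], st.2 - (longer - shorter)))
      ([], longer * k)).1.reverse

-- ===== PRECONDITION & SPEC =====
def Spec_divingBoard (shorter : Int) (longer : Int) (k : Int) (out : List Int) : Prop := out = divingBoard_alt shorter longer k
instance (shorter : Int) (longer : Int) (k : Int) (out : List Int) : Decidable (Spec_divingBoard shorter longer k out) := by unfold Spec_divingBoard; infer_instance

-- ===== CLAIM (what is proved, stated in full; the proofs are below) =====
def Claim_equal_divingBoard : Prop := ∀ (shorter : Int) (longer : Int) (k : Int), Dom_divingBoard shorter longer k → Spec_divingBoard shorter longer k (divingBoard shorter longer k)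

-- ===== LEMMAS AND PROOFS =====

-- A's fill loop: writing g i into slot i for i in [a, a+n) of a list of length a+n
-- replaces everything from position a on by the mapped values.
theorem fill_loop (g : Int → Int) : ∀ (n : Nat) (a : Int) (xs : List Int), 0 ≤ a →
    a + n = xs.length →
    (PySem.List.pyRange a (a + n) 1).foldl (fun r i => r.set i.toNat (g i)) xs
      = xs.take a.toNat ++ (List.range n).map (fun (j : Nat) => g (a + (j : Int))) := by
  intro n
  induction n with
  | zero =>
    intro a xs ha hlen
    rw [show a + ((0:Nat) : Int) = a by simp, PySem.List.pyRange_one_eq_nil le_rfl]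
    simp only [List.foldl_nil, List.range_zero, List.map_nil, List.append_nil]
    have h : a.toNat = xs.length := by omega
    rw [h, List.take_length]
  | succ m ih =>
    intro a xs ha hlen
    have hcast : (((m + 1 : Nat)) : Int) = (m : Int) + 1 := by push_cast; ring
    rw [hcast] at hlen ⊢
    have hab : a < a + ((m : Int) + 1) := by omega
    rw [PySem.List.pyRange_one_cons hab, List.foldl_cons]
    have hset : a + 1 + (m : Int) = (xs.set a.toNat (g a)).length := by
      simp only [List.length_set]; omega
    have hI := ih (a + 1) (xs.set a.toNat (g a)) (by omega) hset
    rw [show a + ((m : Int) + 1) = a + 1 + (m : Int) by ring, hI]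
    have hlt : a.toNat < xs.length := by omega
    rw [List.set_eq_take_append_cons_drop, if_pos hlt]
    have htake : (a + 1).toNat = a.toNat + 1 := by omega
    rw [htake, List.take_append, List.length_take]
    have hmin : min a.toNat xs.length = a.toNat := by omega
    rw [hmin, List.take_take]
    rw [show min (a.toNat + 1) a.toNat = a.toNat by omega]
    rw [show a.toNat + 1 - a.toNat = 1 by omega]
    simp only [List.take_succ_cons, List.take_zero]
    rw [List.range_succ_eq_map, List.map_cons, List.map_map]
    simp only [List.append_assoc, List.cons_append, List.nil_append, List.append_cancel_left_eq]
    congr 1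
    · congr 1; omega
    · apply List.map_congr_left; intro j _
      simp only [Function.comp_apply, Nat.succ_eq_add_one]
      congr 1; push_cast; ring

-- B's accumulator loop: n iterations append the running values c, c-d, …, c-(n-1)d.
theorem acc_loop (d : Int) : ∀ (n : Nat) (a c : Int) (res : List Int),
    (PySem.List.pyRange a (a + n) 1).foldl
        (fun (st : List Int × Int) _ => (st.1 ++ [st.2], st.2 - d)) (res, c)
      = (res ++ (List.range n).map (fun (j : Nat) => c - (j : Int) * d), c - n * d) := by
  intro n
  induction n with
  | zero =>
    intro a c res
    rw [show a + ((0:Nat) : Int) = a by simp, PySem.List.pyRange_one_eq_nil le_rfl]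
    simp
  | succ m ih =>
    intro a c res
    have hcast : (((m + 1 : Nat)) : Int) = (m : Int) + 1 := by push_cast; ring
    rw [hcast]
    have hab : a < a + ((m : Int) + 1) := by omega
    rw [PySem.List.pyRange_one_cons hab, List.foldl_cons]
    rw [show a + ((m : Int) + 1) = a + 1 + (m : Int) by ring]
    rw [ih (a + 1) (c - d) (res ++ [c])]
    simp only [Prod.mk.injEq]
    refine ⟨?_, ?_⟩
    · rw [List.range_succ_eq_map, List.map_cons, List.map_map, List.append_assoc]
      simp only [List.cons_append, List.nil_append, List.cons.injEq,
        List.append_cancel_left_eq]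
      refine ⟨by ring, ?_⟩
      apply List.map_congr_left; intro j _
      simp only [Function.comp_apply]
      push_cast; ring
    · push_cast; ring

-- main computation lemma for shorter ≠ longer, k ≠ 0
theorem both_eq (shorter longer k : Int) (hk0 : k ≠ 0) (hne : shorter ≠ longer) :
    divingBoard shorter longer k = divingBoard_alt shorter longer k := by
  unfold divingBoard divingBoard_alt
  rw [if_neg hk0, if_neg hk0, if_neg hne, if_neg hne]
  set n := (k + 1).toNat with hn
  set diff := longer - shorter with hd
  have hA := fill_loop (fun i => shorter * (k - i) + longer * i) n 0
      (List.replicate n 0) le_rfl (by simp)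
  have hB := acc_loop diff n 0 (longer * k) []
  rcases (by omega : k ≤ 0 ∨ 0 < k) with hneg | hpos
  · -- k < 0: the range is empty, both sides are []
    have hr : PySem.List.pyRange 0 (k + 1) 1 = [] :=
      PySem.List.pyRange_one_eq_nil (by omega)
    have hn0 : n = 0 := by omega
    rw [hr, hn0]
    simp
  · have hcastn : (n : Int) = k + 1 := by omega
    rw [hcastn] at hA hB
    simp only [zero_add] at hA hB
    rw [hA, hB]
    simp only [Int.toNat_zero, List.take_zero, List.nil_append]
    apply List.ext_getElem
    · simp
    · intro i h1 h2
      simp only [List.length_map, List.length_range] at h1 h2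
      rw [List.getElem_map, List.getElem_range, List.getElem_reverse]
      simp only [List.length_map, List.length_range]
      rw [List.getElem_map, List.getElem_range]
      have hlen : ((n - 1 - i : Nat) : Int) = (n : Int) - 1 - i := by
        simp only [List.length_reverse, List.length_map, List.length_range] at h2
        push_cast [Nat.cast_sub (by omega : i + 1 ≤ n)]
        omega
      rw [hlen, hcastn, hd]
      push_cast
      ring

-- ===== VERDICT (by name: the statement is the Claim_ definition above) =====
theorem divingBoard_spec : Claim_equal_divingBoard := by
  intro shorter longer k _
  unfold Spec_divingBoard
  by_cases hk0 : k = 0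
  · simp [divingBoard, divingBoard_alt, hk0]
  by_cases hne : shorter = longer
  · simp [divingBoard, divingBoard_alt, hk0, hne]
  exact both_eq shorter longer k hk0 hne
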